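-- pv_equiv track=rewrite | github.com/neelthepatel8/chesslab | backend/engine/fen_utils.py | make_complete
-- ===== SOURCE A (Python) =====
-- def make_complete(fen):
--     possible_numbers = [0, 1, 2, 3, 4, 5, 6, 7, 8]
--
--     complete_fen = []
--     for row in fen.split(' ')[0].split('/'):
--         for num in possible_numbers:
--             if str(num) in row:
--                 row = row.replace(str(num), "X" * num)
--         complete_fen.append(row)
--
--     return complete_fen
-- ===== SOURCE B (Python) =====
-- def make_complete(fen):
--     return ["".join("X" * (ord(c) - 48) if c in "012345678" else c for c in row)
--             for row in fen.split(' ')[0].split('/')]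
-- ===== Notes on version B (the rewrite author's own statement) =====
-- stated objective: simpler
-- what changed: Replaces A's nine whole-row membership-test-and-replace scans per row with a single per-character pass that expands each digit 0-8 to that many 'X's in place.
import Mathlib
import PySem

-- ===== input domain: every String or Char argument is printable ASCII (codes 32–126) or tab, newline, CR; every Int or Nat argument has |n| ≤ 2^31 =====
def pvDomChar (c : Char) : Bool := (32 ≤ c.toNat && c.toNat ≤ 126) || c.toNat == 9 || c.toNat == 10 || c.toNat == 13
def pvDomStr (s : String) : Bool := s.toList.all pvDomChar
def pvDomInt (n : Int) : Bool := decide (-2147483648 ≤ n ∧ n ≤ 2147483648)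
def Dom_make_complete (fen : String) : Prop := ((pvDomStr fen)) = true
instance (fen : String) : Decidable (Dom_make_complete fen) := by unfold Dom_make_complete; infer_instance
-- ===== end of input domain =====

-- B replaces A's nine per-digit membership-test-and-replace row scans by one per-character pass per row (objective: simpler).


-- ===== PORT A =====
-- fen.split(' ')[0].split('/'); split with a non-empty separator always returns `some` of a
-- non-empty list, so both `.getD` defaults are unreachable.
def pvRows (fen : String) : List String :=
  (PySem.Str.split? ((PySem.List.pyGet? ((PySem.Str.split? fen " ").getD []) 0).getD "") "/").getD []

-- A's inner loop: for num in [0..8]: if str(num) in row: row = row.replace(str(num), "X"*num)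
def pvRowA (row : String) : String :=
  ([0, 1, 2, 3, 4, 5, 6, 7, 8] : List Int).foldl
    (fun r num =>
      if PySem.Str.isIn (PySem.Int.toStr num) r then
        PySem.Str.replace r (PySem.Int.toStr num) (String.ofList (List.replicate num.toNat 'X'))
      else r)
    row

def make_complete (fen : String) : List String :=
  (pvRows fen).foldl (fun acc row => acc ++ [pvRowA row]) []

-- ===== PORT B =====
-- B's per-character expansion of one row
def pvRowB (row : String) : String :=
  String.ofList (row.toList.flatMap (fun c =>
    if c ∈ "012345678".toList then List.replicate (c.toNat - 48) 'X' else [c]))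

def make_complete_alt (fen : String) : List String :=
  (pvRows fen).map pvRowB

-- ===== PRECONDITION & SPEC =====
def Spec_make_complete (fen : String) (out : List String) : Prop := out = make_complete_alt fen
instance (fen : String) (out : List String) : Decidable (Spec_make_complete fen out) := by unfold Spec_make_complete; infer_instance

-- ===== CLAIM (what is proved, stated in full; the proofs are below) =====
def Claim_equal_make_complete : Prop := ∀ (fen : String), Dom_make_complete fen → Spec_make_complete fen (make_complete fen)

-- ===== LEMMAS AND PROOFS =====

-- replace.go with a single-character pattern is a per-character flatMap
theorem pv_go_single (d : Char) (new : List Char) :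
    ∀ (s : List Char) (fuel : Nat) (acc : List Char), s.length ≤ fuel →
      PySem.Chars.replace.go [d] new fuel s acc
        = acc.reverse ++ s.flatMap (fun c => if c = d then new else [c]) := by
  intro s
  induction s with
  | nil => intro fuel acc _; cases fuel <;> simp [PySem.Chars.replace.go]
  | cons c t ih =>
    intro fuel acc hf
    cases fuel with
    | zero => simp at hf
    | succ f =>
      simp only [PySem.Chars.replace.go]
      by_cases hc : c = d
      · subst hc
        rw [if_pos (by simp [List.isPrefixOf])]
        simp only [List.length_cons, List.length_nil, Nat.zero_add, List.drop_succ_cons,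
          List.drop_zero]
        rw [ih f _ (by simpa using hf)]
        simp
      · rw [if_neg (by simp [List.isPrefixOf, Ne.symm hc])]
        rw [ih f _ (by simpa using hf)]
        simp [hc]

theorem pv_replace_single (d : Char) (new s : List Char) :
    PySem.Chars.replace s [d] new = s.flatMap (fun c => if c = d then new else [c]) := by
  rw [PySem.Chars.replace]
  rw [if_neg (by simp)]
  exact pv_go_single d new s s.length [] le_rfl

theorem pv_singleton_infix_iff (d : Char) (l : List Char) : [d] <:+: l ↔ d ∈ l := by
  constructor
  · intro h; exact h.mem (by simp)
  · intro h
    obtain ⟨a, b, hab, -⟩ := List.eq_append_cons_of_mem h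
    exact ⟨a, b, by simp [hab]⟩

-- one guarded replace step of A, at string level
theorem pv_step_str (o n s : String) (d : Char) (ho : o.toList = [d]) :
    (if PySem.Str.isIn o s then PySem.Str.replace s o n else s)
      = String.ofList (s.toList.flatMap (fun c => if c = d then n.toList else [c])) := by
  by_cases h : PySem.Str.isIn o s
  · rw [if_pos h]
    rw [PySem.Str.replace, ho, pv_replace_single]
  · rw [if_neg h]
    have hd : d ∉ s.toList := by
      intro hmem
      apply h
      rw [PySem.Str.isIn, ho, PySem.Chars.isIn_iff_infix]
      exact (pv_singleton_infix_iff d s.toList).mpr hmem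
    have : s.toList.flatMap (fun c => if c = d then n.toList else [c]) = s.toList := by
      rw [show s.toList.flatMap (fun c => if c = d then n.toList else [c])
            = s.toList.flatMap (fun c => [c]) from
          List.flatMap_congr (fun c hc => by rw [if_neg (by rintro rfl; exact hd hc)])]
      exact List.flatMap_singleton' _
    rw [this, String.ofList_toList]

-- A's inner loop on one row equals B's single per-character pass
theorem pv_row_eq (row : String) : pvRowA row = pvRowB row := by
  rw [pvRowA]
  simp only [List.foldl_cons, List.foldl_nil]
  rw [pv_step_str _ _ _ '8' (by decide)]
  rw [pv_step_str _ _ _ '7' (by decide)]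
  rw [pv_step_str _ _ _ '6' (by decide)]
  rw [pv_step_str _ _ _ '5' (by decide)]
  rw [pv_step_str _ _ _ '4' (by decide)]
  rw [pv_step_str _ _ _ '3' (by decide)]
  rw [pv_step_str _ _ _ '2' (by decide)]
  rw [pv_step_str _ _ row '0' (by decide)]
  rw [pv_step_str _ _ _ '1' (by decide)]
  rw [pvRowB]
  simp only [String.toList_ofList, List.flatMap_assoc]
  congr 1
  apply List.flatMap_congr
  intro c _
  by_cases h0 : c = '0'; · subst h0; decide
  by_cases h1 : c = '1'; · subst h1; decide
  by_cases h2 : c = '2'; · subst h2; decide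
  by_cases h3 : c = '3'; · subst h3; decide
  by_cases h4 : c = '4'; · subst h4; decide
  by_cases h5 : c = '5'; · subst h5; decide
  by_cases h6 : c = '6'; · subst h6; decide
  by_cases h7 : c = '7'; · subst h7; decide
  by_cases h8 : c = '8'; · subst h8; decide
  have hl : "012345678".toList = ['0', '1', '2', '3', '4', '5', '6', '7', '8'] := by decide
  simp [hl, h0, h1, h2, h3, h4, h5, h6, h7, h8]

theorem pv_foldl_append_map (g : String → String) :
    ∀ (l : List String) (acc : List String),
      l.foldl (fun acc row => acc ++ [g row]) acc = acc ++ l.map g := by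
  intro l
  induction l with
  | nil => simp
  | cons x t ih => intro acc; simp [ih]

-- ===== VERDICT (by name: the statement is the Claim_ definition above) =====
theorem make_complete_spec : Claim_equal_make_complete := by
  intro fen _
  show make_complete fen = make_complete_alt fen
  rw [make_complete, make_complete_alt, pv_foldl_append_map]
  simp only [List.nil_append]
  exact List.map_congr_left (fun row _ => pv_row_eq row)
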